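-- pv_equiv track=rewrite | github.com/anascaxi/Logica | Exercicios_1INFO2-lista5-while-AnaClara.py | soma_dos_inteiros
-- ===== SOURCE A (Python) =====
-- def soma_dos_inteiros(valor1, valor2):
--     ''' Calcule a soma dos números inteiros no intervalo entre 'valor1'
--     e o 'valor2' ou vice-versa, considerando que podem ser informado
--     números negativos ou fora de ordem.
--     Ex: 1 e 5 ou 5 e 1, retorna 9'''
--     if valor1 > valor2:
--         valour1 = valor2
--         valour2 = valor1
--     else:
--         valour1 = valor1
--         valour2 = valor2
--     soma = 0
--     num = valour1 + 1
--     while num < valour2: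
--             soma += num
--             num += 1
--     return soma
-- ===== SOURCE B (Python) =====
-- def soma_dos_inteiros(valor1, valor2):
--     lo = min(valor1, valor2) + 1
--     hi = max(valor1, valor2) - 1
--     if lo > hi:
--         return 0
--     return (lo + hi) * (hi - lo + 1) // 2
-- ===== Notes on version B (the rewrite author's own statement) =====
-- stated objective: faster
-- what changed: Replaced the while-loop accumulation with the arithmetic-series closed form on the open interval (min+1 .. max-1).
import Mathlib
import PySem

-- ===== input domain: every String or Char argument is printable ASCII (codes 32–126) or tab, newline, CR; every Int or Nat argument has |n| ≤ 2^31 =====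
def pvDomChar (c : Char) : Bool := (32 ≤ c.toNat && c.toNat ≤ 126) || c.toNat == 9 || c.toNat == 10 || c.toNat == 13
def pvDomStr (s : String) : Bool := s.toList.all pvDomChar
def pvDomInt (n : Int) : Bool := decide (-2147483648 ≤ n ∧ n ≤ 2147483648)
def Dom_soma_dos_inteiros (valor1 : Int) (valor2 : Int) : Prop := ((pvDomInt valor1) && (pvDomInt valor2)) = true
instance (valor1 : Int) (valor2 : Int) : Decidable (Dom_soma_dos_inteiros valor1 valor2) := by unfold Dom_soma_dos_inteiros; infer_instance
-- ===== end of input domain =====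

-- B replaces A's O(n) summing while-loop by the O(1) arithmetic-series closed form.

-- ===== PORT A =====
-- while num < valour2: soma += num; num += 1
def somaLoop (soma : Int) (num : Int) (valour2 : Int) : Int :=
  if num < valour2 then somaLoop (soma + num) (num + 1) valour2 else soma
termination_by (valour2 - num).toNat
decreasing_by omega

def soma_dos_inteiros (valor1 : Int) (valor2 : Int) : Int :=
  let (valour1, valour2) :=
    if valor1 > valor2 then (valor2, valor1) else (valor1, valor2)
  somaLoop 0 (valour1 + 1) valour2

-- ===== PORT B =====
def soma_dos_inteiros_alt (valor1 : Int) (valor2 : Int) : Int :=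
  let lo := min valor1 valor2 + 1
  let hi := max valor1 valor2 - 1
  if lo > hi then 0
  else PySem.Int.floordiv ((lo + hi) * (hi - lo + 1)) 2

-- ===== PRECONDITION & SPEC =====
def Spec_soma_dos_inteiros (valor1 : Int) (valor2 : Int) (out : Int) : Prop := out = soma_dos_inteiros_alt valor1 valor2
instance (valor1 : Int) (valor2 : Int) (out : Int) : Decidable (Spec_soma_dos_inteiros valor1 valor2 out) := by unfold Spec_soma_dos_inteiros; infer_instance

-- ===== CLAIM (what is proved, stated in full; the proofs are below) =====
def Claim_equal_soma_dos_inteiros : Prop := ∀ (valor1 : Int) (valor2 : Int), Dom_soma_dos_inteiros valor1 valor2 → Spec_soma_dos_inteiros valor1 valor2 (soma_dos_inteiros valor1 valor2)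

-- ===== LEMMAS AND PROOFS =====

-- The loop computes the accumulator plus the closed-form sum of num .. valour2-1.
theorem somaLoop_closed (soma num v2 : Int) :
    somaLoop soma num v2 =
      soma + (if num < v2 then ((num + v2 - 1) * (v2 - num)) / 2 else 0) := by
  by_cases h : num < v2
  · have hk : (v2 - num).toNat = (v2 - (num + 1)).toNat + 1 := by omega
    rw [somaLoop, if_pos h, somaLoop_closed (soma + num) (num + 1) v2]
    by_cases h2 : num + 1 < v2
    · rw [if_pos h2, if_pos h]
      have hnum : (num + v2 - 1) * (v2 - num)
          = (num + 1 + v2 - 1) * (v2 - (num + 1)) + num * 2 := by ring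
      rw [hnum, Int.add_mul_ediv_right _ _ (by norm_num : (2:Int) ≠ 0)]
      ring
    · have hv : v2 = num + 1 := by omega
      rw [if_neg h2, if_pos h, hv]
      have : (num + (num + 1) - 1) * (num + 1 - num) = num * 2 := by ring
      rw [this, Int.mul_ediv_cancel _ (by norm_num : (2:Int) ≠ 0)]
      ring
  · rw [somaLoop, if_neg h, if_neg h]
    ring
termination_by (v2 - num).toNat
decreasing_by omega

-- ===== VERDICT (by name: the statement is the Claim_ definition above) =====
theorem soma_dos_inteiros_spec : Claim_equal_soma_dos_inteiros := by
  intro v1 v2 _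
  unfold Spec_soma_dos_inteiros soma_dos_inteiros soma_dos_inteiros_alt
  by_cases h : v1 > v2
  · have hmin : min v1 v2 = v2 := by omega
    have hmax : max v1 v2 = v1 := by omega
    simp only [h, if_pos, hmin, hmax, somaLoop_closed]
    by_cases hlt : v2 + 1 < v1
    · rw [if_pos hlt, if_neg (by omega),
        PySem.Int.floordiv_eq_ediv_of_pos (by norm_num)]
      rw [Int.zero_add]; congr 1; ring
    · rw [if_neg hlt, if_pos (by omega)]; norm_num
  · have hle : v1 ≤ v2 := not_lt.mp h
    have hmin : min v1 v2 = v1 := by omega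
    have hmax : max v1 v2 = v2 := by omega
    simp only [h, if_false, hmin, hmax, somaLoop_closed]
    by_cases hlt : v1 + 1 < v2
    · rw [if_pos hlt, if_neg (by omega),
        PySem.Int.floordiv_eq_ediv_of_pos (by norm_num)]
      rw [Int.zero_add]; congr 1; ring
    · rw [if_neg hlt, if_pos (by omega)]; norm_num
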